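-- pv_equiv track=rewrite | github.com/54skyxenon/AOC-2021 | day10.py | part1
-- ===== SOURCE A (Python) =====
-- from typing import List
--
-- PAIRING = {')': '(', '}': '{', ']': '[', '>': '<'}
--
-- SCORE_P1 = {')': 3, ']': 57, '}': 1197, '>': 25137}
--
-- def part1(chunks : List[str]) -> int:
--     ''' Solve part 1 '''
--     error = 0
--     for chunk in chunks:
--         stack = []
--         for c in chunk:
--             if c not in PAIRING:
--                 stack.append(c)
--             elif not stack or PAIRING[c] != stack[-1]:
--                 error += SCORE_P1[c]
--                 break
--             else:
--                 stack.pop()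
--
--     return error
-- ===== SOURCE B (Python) =====
-- PAIRING = {')': '(', '}': '{', ']': '[', '>': '<'}
--
-- SCORE_P1 = {')': 3, ']': 57, '}': 1197, '>': 25137}
--
-- def _pass(s):
--     ''' One left-to-right sweep deleting each adjacent matched bracket pair found. '''
--     out = []
--     i = 0
--     while i < len(s):
--         if i + 1 < len(s) and PAIRING.get(s[i + 1]) == s[i]:
--             i += 2
--         else:
--             out.append(s[i])
--             i += 1
--     return ''.join(out)
--
-- def part1(chunks):
--     ''' Solve part 1 '''
--     total = 0
--     for chunk in chunks:
--         s = chunk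
--         while True:
--             t = _pass(s)
--             if t == s:
--                 break
--             s = t
--         for c in s:
--             if c in SCORE_P1:
--                 total += SCORE_P1[c]
--                 break
--     return total
-- ===== Notes on version B (the rewrite author's own statement) =====
-- stated objective: alternative
-- what changed: Replaces A's explicit stack with per-chunk break-on-mismatch by a rewriting approach: repeatedly sweep the chunk deleting adjacent matched bracket pairs until a fixpoint, then score the first closing bracket left in the reduced remainder.
import Mathlib
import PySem

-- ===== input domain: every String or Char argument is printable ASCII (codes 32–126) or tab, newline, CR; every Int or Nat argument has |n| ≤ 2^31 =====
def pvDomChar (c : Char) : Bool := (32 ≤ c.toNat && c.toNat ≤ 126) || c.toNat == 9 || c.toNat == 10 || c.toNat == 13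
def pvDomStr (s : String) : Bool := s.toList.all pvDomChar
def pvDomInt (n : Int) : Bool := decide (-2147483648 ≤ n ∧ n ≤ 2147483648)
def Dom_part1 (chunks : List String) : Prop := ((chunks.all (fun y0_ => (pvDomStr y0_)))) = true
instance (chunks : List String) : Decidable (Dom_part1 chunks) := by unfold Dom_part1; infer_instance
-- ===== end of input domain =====

-- B replaces A's stack scan (break on first mismatched closer) by repeated sweeps deleting
-- adjacent matched bracket pairs to a fixpoint, then scoring the first closer that survives.

-- ===== PORT A =====
def PAIRING : PySem.Dict Char Char := PySem.Dict.ofList [(')','('),('}','{'),(']','['),('>','<')]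

def SCORE_P1 : PySem.Dict Char Int := PySem.Dict.ofList [(')',3),(']',57),('}',1197),('>',25137)]

-- the inner 'for c in chunk' loop of A: returns the score added before the break (0 if none)
def aChunk : List Char → List Char → Int
  | [], _stack => 0
  | c :: rest, stack =>
    if PAIRING.contains c = false then
      aChunk rest (stack ++ [c])                              -- stack.append(c)
    else if stack = [] ∨ PAIRING.get? c ≠ PySem.List.pyGet? stack (-1) then
      SCORE_P1.getD c 0                                       -- error += SCORE_P1[c]; break
    else
      aChunk rest stack.dropLast                              -- stack.pop()

def part1 (chunks : List String) : Int :=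
  chunks.foldl (fun error chunk => error + aChunk chunk.toList []) 0

-- ===== PORT B =====
-- one sweep of _pass: delete each adjacent matched pair met left to right
def bPass : List Char → List Char
  | x :: y :: rest =>
    if PAIRING.get? y = some x then bPass rest
    else x :: bPass (y :: rest)
  | s => s

lemma bPass_length_le : ∀ s : List Char, (bPass s).length ≤ s.length := by
  intro s
  induction s using bPass.induct with
  | case1 x y rest hg _ih => simp only [bPass, if_pos hg]; simp; omega
  | case2 x y rest h ih => simp only [bPass, if_neg h]; simpa using ih
  | case3 s _h => simp [bPass.eq_def]

lemma bPass_eq_or_lt (s : List Char) : bPass s = s ∨ (bPass s).length < s.length := by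
  induction s using bPass.induct with
  | case1 x y rest h ih =>
    right
    simp only [bPass, if_pos h]
    have := bPass_length_le rest
    simp; omega
  | case2 x y rest h ih =>
    simp only [bPass, if_neg h]
    rcases ih with h' | h'
    · left; rw [h']
    · right; simpa using h'
  | case3 s _h => left; simp [bPass.eq_def]

-- the 'while True' fixpoint loop of B
def bReduce (s : List Char) : List Char :=
  if h : bPass s = s then s
  else bReduce (bPass s)
  termination_by s.length
  decreasing_by
    rcases bPass_eq_or_lt s with h' | h'
    · exact absurd h' h
    · exact h'

-- the 'for c in s' scoring loop of B
def bScan : List Char → Int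
  | [] => 0
  | c :: rest => if SCORE_P1.contains c then SCORE_P1.getD c 0 else bScan rest

def part1_alt (chunks : List String) : Int :=
  chunks.foldl (fun total chunk => total + bScan (bReduce chunk.toList)) 0

-- ===== PRECONDITION & SPEC =====
def Spec_part1 (chunks : List String) (out : Int) : Prop := out = part1_alt chunks
instance (chunks : List String) (out : Int) : Decidable (Spec_part1 chunks out) := by unfold Spec_part1; infer_instance

-- ===== CLAIM (what is proved, stated in full; the proofs are below) =====
def Claim_equal_part1 : Prop := ∀ (chunks : List String), Dom_part1 chunks → Spec_part1 chunks (part1 chunks)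

-- ===== LEMMAS AND PROOFS =====

-- function forms of the two dict lookups, for the proofs
def fpair (c : Char) : Option Char :=
  if c = ')' then some '(' else if c = '}' then some '{'
  else if c = ']' then some '[' else if c = '>' then some '<' else none

def fscore (c : Char) : Int :=
  if c = ')' then 3 else if c = ']' then 57
  else if c = '}' then 1197 else if c = '>' then 25137 else 0

lemma pget (c : Char) : PAIRING.get? c = fpair c := by
  rcases Decidable.em (c = ')') with rfl|h1; · decide
  rcases Decidable.em (c = '}') with rfl|h2; · decide
  rcases Decidable.em (c = ']') with rfl|h3; · decide
  rcases Decidable.em (c = '>') with rfl|h4; · decide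
  have e1 : (')' == c) = false := beq_eq_false_iff_ne.mpr (fun e => h1 e.symm)
  have e2 : ('}' == c) = false := beq_eq_false_iff_ne.mpr (fun e => h2 e.symm)
  have e3 : (']' == c) = false := beq_eq_false_iff_ne.mpr (fun e => h3 e.symm)
  have e4 : ('>' == c) = false := beq_eq_false_iff_ne.mpr (fun e => h4 e.symm)
  have h : PAIRING.items = [(')','('),('}','{'),(']','['),('>','<')] := by decide
  simp [PySem.Dict.get?, h, List.find?, e1, e2, e3, e4, fpair, h1, h2, h3, h4]

lemma pcontains (c : Char) : PAIRING.contains c = (fpair c).isSome := by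
  rcases Decidable.em (c = ')') with rfl|h1; · decide
  rcases Decidable.em (c = '}') with rfl|h2; · decide
  rcases Decidable.em (c = ']') with rfl|h3; · decide
  rcases Decidable.em (c = '>') with rfl|h4; · decide
  have e1 : (')' == c) = false := beq_eq_false_iff_ne.mpr (fun e => h1 e.symm)
  have e2 : ('}' == c) = false := beq_eq_false_iff_ne.mpr (fun e => h2 e.symm)
  have e3 : (']' == c) = false := beq_eq_false_iff_ne.mpr (fun e => h3 e.symm)
  have e4 : ('>' == c) = false := beq_eq_false_iff_ne.mpr (fun e => h4 e.symm)
  have h : PAIRING.items = [(')','('),('}','{'),(']','['),('>','<')] := by decide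
  simp [PySem.Dict.contains, h, e1, e2, e3, e4, fpair, h1, h2, h3, h4]

lemma sgetD (c : Char) : SCORE_P1.getD c 0 = fscore c := by
  rcases Decidable.em (c = ')') with rfl|h1; · decide
  rcases Decidable.em (c = ']') with rfl|h2; · decide
  rcases Decidable.em (c = '}') with rfl|h3; · decide
  rcases Decidable.em (c = '>') with rfl|h4; · decide
  have e1 : (')' == c) = false := beq_eq_false_iff_ne.mpr (fun e => h1 e.symm)
  have e2 : ((']' : Char) == c) = false := beq_eq_false_iff_ne.mpr (fun e => h2 e.symm)
  have e3 : (('}' : Char) == c) = false := beq_eq_false_iff_ne.mpr (fun e => h3 e.symm)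
  have e4 : (('>' : Char) == c) = false := beq_eq_false_iff_ne.mpr (fun e => h4 e.symm)
  have h : SCORE_P1.items = [(')',(3:Int)),(']',57),('}',1197),('>',25137)] := by decide
  simp [PySem.Dict.getD, PySem.Dict.get?, h, List.find?, e1, e2, e3, e4, fscore, h1, h2, h3, h4]

lemma scontains (c : Char) : SCORE_P1.contains c = (fpair c).isSome := by
  rcases Decidable.em (c = ')') with rfl|h1; · decide
  rcases Decidable.em (c = ']') with rfl|h2; · decide
  rcases Decidable.em (c = '}') with rfl|h3; · decide
  rcases Decidable.em (c = '>') with rfl|h4; · decide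
  have e1 : (')' == c) = false := beq_eq_false_iff_ne.mpr (fun e => h1 e.symm)
  have e2 : ((']' : Char) == c) = false := beq_eq_false_iff_ne.mpr (fun e => h2 e.symm)
  have e3 : (('}' : Char) == c) = false := beq_eq_false_iff_ne.mpr (fun e => h3 e.symm)
  have e4 : (('>' : Char) == c) = false := beq_eq_false_iff_ne.mpr (fun e => h4 e.symm)
  have h : SCORE_P1.items = [(')',(3:Int)),(']',57),('}',1197),('>',25137)] := by decide
  simp [PySem.Dict.contains, h, e1, e2, e3, e4, fpair, h1, h2, h3, h4]

-- the values of fpair are openers, which are not keys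
lemma fpair_opener {c x : Char} (h : fpair c = some x) : fpair x = none := by
  unfold fpair at h ⊢; split_ifs at h <;> simp_all <;> subst h <;> decide

-- canonical stack reducer (head of the first argument = top of stack)
def nfS : List Char → List Char → List Char
  | stk, [] => stk.reverse
  | [], c :: cs => nfS [c] cs
  | t :: stk', c :: cs => if fpair c = some t then nfS stk' cs else nfS (c :: t :: stk') cs

-- cons-stack version of A's inner loop
def aL : List Char → List Char → Int
  | [], _ => 0
  | c :: rest, stk =>
    if (fpair c).isSome = false then aL rest (c :: stk)
    else match stk with
      | [] => fscore c
      | t :: stk' => if fpair c ≠ some t then fscore c else aL rest stk'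

-- score of the first closer
def sScan : List Char → Int
  | [] => 0
  | c :: r => if (fpair c).isSome then fscore c else sScan r

lemma pyGet?_concat_neg_one (u : List Char) (t : Char) :
    PySem.List.pyGet? (u ++ [t]) (-1) = some t := by
  simp [PySem.List.pyGet?, PySem.List.pyIdx?]

lemma aChunk_eq_aL : ∀ (cs rstk : List Char), aChunk cs rstk.reverse = aL cs rstk := by
  intro cs
  induction cs with
  | nil => intro rstk; rfl
  | cons c rest ih =>
    intro rstk
    by_cases hc : (fpair c).isSome
    · have hcont : PAIRING.contains c = true := by rw [pcontains, hc]
      cases rstk with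
      | nil =>
        simp only [aChunk, aL, hcont, hc, List.reverse_nil]
        simp [sgetD]
      | cons t r =>
        by_cases hm : fpair c = some t
        · simp only [aChunk, aL, hcont, hc, List.reverse_cons]
          rw [pget, pyGet?_concat_neg_one, hm]
          simp only [ne_eq, not_true_eq_false, or_false, List.dropLast_concat]
          simpa [hm] using ih r
        · simp only [aChunk, aL, hcont, hc, List.reverse_cons]
          rw [pget, pyGet?_concat_neg_one]
          have : (t :: r).reverse ++ [t] ≠ [] := by simp
          simp [hm, sgetD]
    · have hcont : PAIRING.contains c = false := by rw [pcontains]; simp_all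
      simp only [aChunk, aL, hcont, hc]
      rw [← List.reverse_cons]
      exact ih (c :: rstk)

lemma bPass_cons_fix {c : Char} {cs : List Char} (h : bPass (c :: cs) = c :: cs) :
    bPass cs = cs := by
  cases cs with
  | nil => rfl
  | cons y r =>
    by_cases hg : PAIRING.get? y = some c
    · exfalso
      simp only [bPass, if_pos hg] at h
      have := bPass_length_le r
      have := congrArg List.length h
      simp at this; omega
    · simp only [bPass, if_neg hg] at h
      exact (List.cons.injEq _ _ _ _ ▸ h).2

lemma bPass_fix_head {c d : Char} {r : List Char} (h : bPass (c :: d :: r) = c :: d :: r) :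
    fpair d ≠ some c := by
  intro hm
  have hg : PAIRING.get? d = some c := by rw [pget]; exact hm
  simp only [bPass, if_pos hg] at h
  have := bPass_length_le r
  have := congrArg List.length h
  simp at this; omega

lemma nfS_bPass : ∀ (s stk : List Char), nfS stk (bPass s) = nfS stk s := by
  intro s
  induction s using bPass.induct with
  | case1 x y rest h ih =>
    intro stk
    have hm : fpair y = some x := by rw [← pget]; exact h
    have hx : fpair x = none := fpair_opener hm
    rw [show bPass (x :: y :: rest) = bPass rest from by simp [bPass, h]]
    cases stk with
    | nil => simp only [nfS, hm, if_pos]; exact ih []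
    | cons t stk' =>
      have hxt : ¬ fpair x = some t := by simp [hx]
      simp only [nfS, if_neg hxt, if_pos hm]
      exact ih _
  | case2 x y rest h ih =>
    intro stk
    rw [show bPass (x :: y :: rest) = x :: bPass (y :: rest) from by simp [bPass, h]]
    cases stk with
    | nil => simp only [nfS]; exact ih [x]
    | cons t stk' =>
      by_cases hp : fpair x = some t
      · simp only [nfS, if_pos hp]; exact ih stk'
      · simp only [nfS, if_neg hp]; exact ih _
  | case3 s _h => intro stk; rw [show bPass s = s from by simp [bPass.eq_def]]

lemma bPass_bReduce (s : List Char) : bPass (bReduce s) = bReduce s := by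
  induction s using bReduce.induct with
  | case1 s h => rw [bReduce, dif_pos h]; exact h
  | case2 s h ih => rw [bReduce, dif_neg h]; exact ih

lemma nfS_bReduce (s stk : List Char) : nfS stk (bReduce s) = nfS stk s := by
  induction s using bReduce.induct generalizing stk with
  | case1 s h => rw [bReduce, dif_pos h]
  | case2 s h ih => rw [bReduce, dif_neg h, ih, nfS_bPass]

lemma nfS_of_fix : ∀ (s stk : List Char), bPass s = s →
    (∀ c t, s.head? = some c → stk.head? = some t → fpair c ≠ some t) →
    nfS stk s = stk.reverse ++ s := by
  intro s
  induction s with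
  | nil => intro stk _ _; simp [nfS]
  | cons c cs ih =>
    intro stk hfix hhd
    have hcs : bPass cs = cs := bPass_cons_fix hfix
    have hnext : ∀ d t, cs.head? = some d → (c :: stk).head? = some t → fpair d ≠ some t := by
      intro d t hd ht
      cases cs with
      | nil => simp at hd
      | cons d' r =>
        simp only [List.head?_cons, Option.some.injEq] at hd ht
        subst hd; subst ht
        exact bPass_fix_head hfix
    cases stk with
    | nil =>
      simp only [nfS]
      rw [ih [c] hcs hnext]
      simp
    | cons t stk' =>
      have hpop : ¬ fpair c = some t := hhd c t rfl rfl
      simp only [nfS, if_neg hpop]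
      rw [ih (c :: t :: stk') hcs hnext]
      simp

lemma nfS_frozen {c : Char} (hc : (fpair c).isSome) :
    ∀ (cs top bot : List Char), ∃ rest, nfS (top ++ c :: bot) cs = bot.reverse ++ c :: rest := by
  intro cs
  induction cs with
  | nil =>
    intro top bot
    exact ⟨top.reverse, by simp [nfS]⟩
  | cons d cs ih =>
    intro top bot
    cases top with
    | nil =>
      have hnc : ¬ fpair d = some c := by
        intro h
        rw [fpair_opener h] at hc
        simp at hc
      simp only [List.nil_append, nfS, if_neg hnc]
      exact ih [d] bot
    | cons t top' =>
      by_cases hp : fpair d = some t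
      · simp only [List.cons_append, nfS, if_pos hp]
        exact ih top' bot
      · simp only [List.cons_append, nfS, if_neg hp]
        exact ih (d :: t :: top') bot

lemma sScan_no {l : List Char} (h : ∀ x ∈ l, fpair x = none) : sScan l = 0 := by
  induction l with
  | nil => rfl
  | cons x r ih =>
    have hx : fpair x = none := h x (by simp)
    simp only [sScan, hx, Option.isSome_none, Bool.false_eq_true, if_false]
    exact ih (fun y hy => h y (by simp [hy]))

lemma sScan_append {u : List Char} (v : List Char) (h : ∀ x ∈ u, fpair x = none) :
    sScan (u ++ v) = sScan v := by
  induction u with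
  | nil => rfl
  | cons x r ih =>
    have hx : fpair x = none := h x (by simp)
    simp only [List.cons_append, sScan, hx, Option.isSome_none, Bool.false_eq_true, if_false]
    exact ih (fun y hy => h y (by simp [hy]))

lemma aL_nfS : ∀ (cs stk : List Char), (∀ x ∈ stk, fpair x = none) →
    aL cs stk = sScan (nfS stk cs) := by
  intro cs
  induction cs with
  | nil =>
    intro stk hinv
    simp only [aL, nfS]
    exact (sScan_no (fun x hx => hinv x (List.mem_reverse.mp hx))).symm
  | cons c rest ih =>
    intro stk hinv
    by_cases hc : (fpair c).isSome
    · have hcf : ¬ ((fpair c).isSome = false) := by simp [hc]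
      cases stk with
      | nil =>
        simp only [aL, if_neg hcf]
        obtain ⟨r, hr⟩ := nfS_frozen hc rest [] []
        simp only [List.nil_append] at hr
        simp only [nfS, hr, List.reverse_nil, List.nil_append, sScan, hc, if_pos]
      | cons t stk' =>
        by_cases hm : fpair c = some t
        · have : ¬ (fpair c ≠ some t) := by simp [hm]
          simp only [aL, if_neg hcf, if_neg this, nfS, if_pos hm]
          exact ih stk' (fun x hx => hinv x (by simp [hx]))
        · simp only [aL, if_neg hcf, if_pos hm, nfS, if_neg hm]
          obtain ⟨r, hr⟩ := nfS_frozen hc rest [] (t :: stk')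
          simp only [List.nil_append] at hr
          rw [hr, sScan_append (c :: r) (fun x hx => hinv x (List.mem_reverse.mp hx))]
          simp only [sScan, hc, if_pos]
    · have hcn : fpair c = none := Option.not_isSome_iff_eq_none.mp hc
      have hcf : (fpair c).isSome = false := by simp [hcn]
      cases stk with
      | nil =>
        simp only [aL, hcf, nfS]
        exact ih [c] (by intro x hx; simp at hx; subst hx; exact hcn)
      | cons t stk' =>
        have hnm : ¬ fpair c = some t := by simp [hcn]
        simp only [aL, hcf, nfS, if_neg hnm]
        exact ih (c :: t :: stk') (by
          intro x hx
          rcases List.mem_cons.mp hx with rfl | hx'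
          · exact hcn
          · exact hinv x hx')

lemma bScan_eq_sScan : ∀ s : List Char, bScan s = sScan s := by
  intro s
  induction s with
  | nil => rfl
  | cons c r ih => simp only [bScan, sScan, scontains, sgetD, ih]

lemma chunk_eq (cs : List Char) : aChunk cs [] = bScan (bReduce cs) := by
  have h1 : aChunk cs [] = aL cs [] := aChunk_eq_aL cs []
  have h2 : aL cs [] = sScan (nfS [] cs) := aL_nfS cs [] (by simp)
  have h3 : nfS [] (bReduce cs) = nfS [] cs := nfS_bReduce cs []
  have h4 : nfS [] (bReduce cs) = bReduce cs := by
    have := nfS_of_fix (bReduce cs) [] (bPass_bReduce cs) (by simp)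
    simpa using this
  rw [h1, h2, ← h3, h4, bScan_eq_sScan]

-- ===== VERDICT (by name: the statement is the Claim_ definition above) =====
theorem part1_spec : Claim_equal_part1 := by
  intro chunks _
  unfold Spec_part1 part1 part1_alt
  simp only [chunk_eq]
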